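-- pv_equiv track=rewrite | github.com/Hi-Fi/samu | app/swap.py | length_to_swap
-- ===== SOURCE A (Python) =====
-- vowels = "aeiouyäöå"
--
-- def length_to_swap(word: str) -> int:
--     looked_index = -1
--     for index, char in enumerate(word):
--         if char in vowels:
--             looked_index = index
--         elif looked_index > -1:
--             return looked_index
--     return len(word)-1
-- ===== SOURCE B (Python) =====
-- vowels = "aeiouyäöå"
--
-- def length_to_swap(word: str) -> int:
--     n = len(word)
--     i = 0
--     while i < n and word[i] not in vowels:
--         i += 1
--     j = i
--     while j < n and word[j] in vowels:
--         j += 1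
--     return j - 1 if j > i else n - 1
-- ===== Notes on version B (the rewrite author's own statement) =====
-- stated objective: alternative
-- what changed: Replaces A's single stateful scan tracking the last vowel index with a two-phase pointer scan (skip leading consonants, then skip the first vowel run) and returns an arithmetic result from the two positions.
import Mathlib
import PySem

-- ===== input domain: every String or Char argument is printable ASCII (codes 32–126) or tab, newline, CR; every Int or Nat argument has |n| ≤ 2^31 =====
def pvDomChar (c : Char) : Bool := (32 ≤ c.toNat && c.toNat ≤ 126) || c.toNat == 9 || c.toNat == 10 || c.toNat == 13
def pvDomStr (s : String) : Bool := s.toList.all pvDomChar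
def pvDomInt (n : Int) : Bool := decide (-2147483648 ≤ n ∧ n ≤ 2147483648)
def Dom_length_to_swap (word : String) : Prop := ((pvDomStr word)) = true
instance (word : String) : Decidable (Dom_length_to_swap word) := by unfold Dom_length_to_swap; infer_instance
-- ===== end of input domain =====

-- B replaces A's stateful last-vowel scan by a two-phase pointer scan (skip consonants, skip vowel run, arithmetic on the two positions); same cost, different decomposition.


-- ===== PORT A =====
-- char in vowels (single char in a string) = membership in the vowel characters
def pvIsVowel (c : Char) : Bool := ("aeiouyäöå".toList).contains c

-- A's for-loop over enumerate(word) with early return, state = looked_index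
def pvLtsGoA (n : Int) : List Char → Int → Int → Int
  | [], _, _ => n - 1
  | c :: cs, idx, looked =>
    if pvIsVowel c then pvLtsGoA n cs (idx + 1) idx
    else if looked > -1 then looked
    else pvLtsGoA n cs (idx + 1) looked

def length_to_swap (word : String) : Int :=
  pvLtsGoA (word.toList.length : Int) word.toList 0 (-1)

-- ===== PORT B =====
-- B's first while loop: advance i past leading non-vowels
def pvLtsSkipCons : List Char → Int → Int × List Char
  | [], i => (i, [])
  | c :: cs, i => if pvIsVowel c then (i, c :: cs) else pvLtsSkipCons cs (i + 1)

-- B's second while loop: advance j past the vowel run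
def pvLtsSkipVow : List Char → Int → Int
  | [], j => j
  | c :: cs, j => if pvIsVowel c then pvLtsSkipVow cs (j + 1) else j

def length_to_swap_alt (word : String) : Int :=
  let n : Int := (word.toList.length : Int)
  let p := pvLtsSkipCons word.toList 0
  let j := pvLtsSkipVow p.2 p.1
  if j > p.1 then j - 1 else n - 1

-- ===== PRECONDITION & SPEC =====
def Spec_length_to_swap (word : String) (out : Int) : Prop := out = length_to_swap_alt word
instance (word : String) (out : Int) : Decidable (Spec_length_to_swap word out) := by unfold Spec_length_to_swap; infer_instance

-- ===== CLAIM (what is proved, stated in full; the proofs are below) =====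
def Claim_equal_length_to_swap : Prop := ∀ (word : String), Dom_length_to_swap word → Spec_length_to_swap word (length_to_swap word)

-- ===== LEMMAS AND PROOFS =====

theorem pvSkipCons_inv : ∀ (cs : List Char) (i : Int),
    (pvLtsSkipCons cs i).1 + ((pvLtsSkipCons cs i).2.length : Int) = i + (cs.length : Int) := by
  intro cs
  induction cs with
  | nil => intro i; simp [pvLtsSkipCons]
  | cons c cs ih =>
    intro i
    by_cases h : pvIsVowel c = true
    · simp [pvLtsSkipCons, h]
    · simp only [pvLtsSkipCons, h, if_neg, Bool.not_eq_true] at *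
      have := ih (i + 1)
      simp only [List.length_cons]
      push_cast at *
      omega

theorem pvSkipCons_ge : ∀ (cs : List Char) (i : Int), i ≤ (pvLtsSkipCons cs i).1 := by
  intro cs
  induction cs with
  | nil => intro i; simp [pvLtsSkipCons]
  | cons c cs ih =>
    intro i
    by_cases h : pvIsVowel c = true
    · simp [pvLtsSkipCons, h]
    · simp only [pvLtsSkipCons, h, if_neg, Bool.not_eq_true]
      have := ih (i + 1)
      omega

theorem pvSkipCons_head : ∀ (cs : List Char) (i : Int) (c : Char) (cs' : List Char),
    (pvLtsSkipCons cs i).2 = c :: cs' → pvIsVowel c = true := by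
  intro cs
  induction cs with
  | nil => intro i c cs' h; simp [pvLtsSkipCons] at h
  | cons d cs ih =>
    intro i c cs' h
    by_cases hv : pvIsVowel d = true
    · simp [pvLtsSkipCons, hv] at h
      rw [← h.1]; exact hv
    · simp only [pvLtsSkipCons, hv, if_neg, Bool.not_eq_true] at h
      exact ih (i + 1) c cs' h

theorem pvSkipVow_ge : ∀ (cs : List Char) (j : Int), j ≤ pvLtsSkipVow cs j := by
  intro cs
  induction cs with
  | nil => intro j; simp [pvLtsSkipVow]
  | cons c cs ih =>
    intro j
    by_cases h : pvIsVowel c = true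
    · simp only [pvLtsSkipVow, h, if_pos]
      have := ih (j + 1)
      omega
    · simp [pvLtsSkipVow, h]

-- A's loop in the "inside the first vowel run" phase (looked = idx - 1 ≥ 0)
theorem pvGoA_vowPhase : ∀ (cs : List Char) (idx n : Int), 1 ≤ idx →
    idx + (cs.length : Int) = n →
    pvLtsGoA n cs idx (idx - 1) = pvLtsSkipVow cs idx - 1 := by
  intro cs
  induction cs with
  | nil => intro idx n h1 h2; simp at h2; simp [pvLtsGoA, pvLtsSkipVow]; omega
  | cons c cs ih =>
    intro idx n h1 h2
    by_cases hv : pvIsVowel c = true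
    · simp only [pvLtsGoA, pvLtsSkipVow, hv, if_pos]
      have h2' : (idx + 1) + (cs.length : Int) = n := by
        simp only [List.length_cons] at h2; push_cast at h2 ⊢; omega
      have := ih (idx + 1) n (by omega) h2'
      simpa using this
    · simp only [pvLtsGoA, pvLtsSkipVow, hv, Bool.false_eq_true, if_false]
      rw [if_pos (by omega)]

-- A's loop in the "no vowel seen yet" phase (looked = -1)
theorem pvGoA_consPhase : ∀ (cs : List Char) (idx n : Int),
    pvLtsGoA n cs idx (-1) =
      (match (pvLtsSkipCons cs idx).2, (pvLtsSkipCons cs idx).1 with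
       | [], _ => n - 1
       | _ :: cs', i => pvLtsGoA n cs' (i + 1) i) := by
  intro cs
  induction cs with
  | nil => intro idx n; simp [pvLtsGoA, pvLtsSkipCons]
  | cons c cs ih =>
    intro idx n
    by_cases hv : pvIsVowel c = true
    · simp [pvLtsGoA, pvLtsSkipCons, hv]
    · simp only [pvLtsGoA, pvLtsSkipCons, hv, Bool.false_eq_true, if_false]
      rw [if_neg (by omega)]
      exact ih (idx + 1) n

-- ===== VERDICT (by name: the statement is the Claim_ definition above) =====
theorem length_to_swap_spec : Claim_equal_length_to_swap := by
  unfold Claim_equal_length_to_swap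
  intro word _
  unfold Spec_length_to_swap length_to_swap length_to_swap_alt
  set cs := word.toList with hcs
  set n : Int := (cs.length : Int) with hn
  rw [pvGoA_consPhase cs 0 n]
  have hinv := pvSkipCons_inv cs 0
  have hge := pvSkipCons_ge cs 0
  rcases hrest : (pvLtsSkipCons cs 0).2 with _ | ⟨c, cs'⟩
  · -- no vowel at all: A returns n-1; B: j = i, j > i false, n-1
    simp only [hrest, pvLtsSkipVow]
    rw [if_neg (by omega)]
  · -- rest = c :: cs', c is a vowel
    have hv : pvIsVowel c = true := pvSkipCons_head cs 0 c cs' hrest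
    set i := (pvLtsSkipCons cs 0).1 with hi
    have hlen : (i + 1) + (cs'.length : Int) = n := by
      rw [hrest] at hinv; simp only [List.length_cons] at hinv
      push_cast at hinv ⊢; omega
    simp only [hrest]
    have hA := pvGoA_vowPhase cs' (i + 1) n (by omega) hlen
    have hsimp : (i + 1) - 1 = i := by omega
    rw [hsimp] at hA
    rw [hA]
    simp only [pvLtsSkipVow, hv, if_pos, ← hi]
    have hge2 := pvSkipVow_ge cs' (i + 1)
    rw [if_pos (by omega)]
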